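-- pv_equiv track=rewrite | github.com/Aakash-2904/Foundation-AI-assignment | Method - 2/agent.py | fallback_latex
-- ===== SOURCE A (Python) =====
-- COL_TITLE   = "Position Title"
--
-- COL_COMPANY = "Company"
--
-- def fallback_latex(base_resume: str, job: dict, reason: str) -> str:
--     """
--     If the model returns broken JSON or something unexpected happens,
--     we still need to write *something* to disk rather than crashing.
--     This fallback embeds the raw resume text in a minimal LaTeX doc
--     and leaves a comment explaining why the tailoring failed.
--     The candidate can then fix it manually or rerun just that job.
--     """
--     def e(s):
--         # Lightweight escaper — just enough to avoid LaTeX breaking on common symbols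
--         for c in "&%$#_{}~^":
--             s = s.replace(c, f"\\{c}")
--         return s
--     title   = e(str(job.get(COL_TITLE,   "Position")))
--     company = e(str(job.get(COL_COMPANY, "Company")))
--     return (
--         "\\documentclass[11pt]{article}\n\\usepackage[margin=0.75in]{geometry}\n"
--         "\\usepackage{parskip}\n\\begin{document}\n\n"
--         f"% Tailoring failed: {reason}\n% Job: {title} @ {company}\n\n"
--         "\\begin{center}{\\Large \\textbf{" + title + " --- " + company + "}}\\end{center}\n\n"
--         + e(base_resume[:3000]) + "\n\n\\end{document}\n"
--     )
-- ===== SOURCE B (Python) =====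
-- COL_TITLE   = "Position Title"
--
-- COL_COMPANY = "Company"
--
-- def fallback_latex(base_resume: str, job: dict, reason: str) -> str:
--     def e(s):
--         # One explicit left-to-right pass with an output accumulator:
--         # emit a backslash before each special character, then the character.
--         out = []
--         for ch in s:
--             if ch in "&%$#_{}~^":
--                 out.append('\\')
--             out.append(ch)
--         return ''.join(out)
--
--     title   = e(str(job.get(COL_TITLE,   "Position")))
--     company = e(str(job.get(COL_COMPANY, "Company")))
--     parts = [
--         "\\documentclass[11pt]{article}\n\\usepackage[margin=0.75in]{geometry}\n"
--         "\\usepackage{parskip}\n\\begin{document}\n\n"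
--         "% Tailoring failed: ", reason,
--         "\n% Job: ", title, " @ ", company,
--         "\n\n\\begin{center}{\\Large \\textbf{", title, " --- ", company,
--         "}}\\end{center}\n\n",
--         e(base_resume[:3000]),
--         "\n\n\\end{document}\n",
--     ]
--     return ''.join(parts)
-- ===== Notes on version B (the rewrite author's own statement) =====
-- stated objective: alternative
-- what changed: The escaper's eight chained .replace scans are replaced by one explicit accumulator pass that emits a backslash before each special character, and the document is assembled by joining a flat list of parts instead of nested string concatenation.
import Mathlib
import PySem

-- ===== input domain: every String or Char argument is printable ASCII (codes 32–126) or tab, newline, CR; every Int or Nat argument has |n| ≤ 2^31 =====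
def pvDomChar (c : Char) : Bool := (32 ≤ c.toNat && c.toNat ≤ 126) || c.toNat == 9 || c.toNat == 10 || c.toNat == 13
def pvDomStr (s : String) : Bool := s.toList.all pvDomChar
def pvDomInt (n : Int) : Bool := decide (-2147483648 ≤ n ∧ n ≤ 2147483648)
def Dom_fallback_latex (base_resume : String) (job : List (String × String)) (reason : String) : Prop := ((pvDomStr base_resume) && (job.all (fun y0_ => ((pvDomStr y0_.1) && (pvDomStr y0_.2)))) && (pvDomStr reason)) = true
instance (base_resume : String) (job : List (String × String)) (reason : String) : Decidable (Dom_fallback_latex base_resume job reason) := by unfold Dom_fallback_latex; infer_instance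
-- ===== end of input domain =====

-- B replaces the escaper's eight chained .replace scans by one explicit accumulator pass and assembles the document by joining a flat list of parts (alternative decomposition, return value proved equal).


-- ===== PORT A =====
-- helper `e` of A: for c in "&%$#_{}~^": s = s.replace(c, "\" + c)
def pvEscA (s : String) : String :=
  "&%$#_{}~^".toList.foldl
    (fun s c => PySem.Str.replace s (String.ofList [c]) (String.ofList ['\\', c])) s

def fallback_latex (base_resume : String) (job : List (String × String)) (reason : String) : String :=
  let title := pvEscA (PySem.Dict.getD (PySem.Dict.mk job) "Position Title" "Position")
  let company := pvEscA (PySem.Dict.getD (PySem.Dict.mk job) "Company" "Company")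
  "\\documentclass[11pt]{article}\n\\usepackage[margin=0.75in]{geometry}\n\\usepackage{parskip}\n\\begin{document}\n\n% Tailoring failed: "
    ++ reason ++ "\n% Job: " ++ title ++ " @ " ++ company
    ++ "\n\n\\begin{center}{\\Large \\textbf{" ++ title ++ " --- " ++ company
    ++ "}}\\end{center}\n\n" ++ pvEscA (PySem.Str.slice base_resume none (some 3000))
    ++ "\n\n\\end{document}\n"

-- ===== PORT B =====
-- helper `e` of B: explicit pass over the characters with an output accumulator
-- (out.append('\') before each special char, then out.append(ch)); built in reverse, reversed at the end.
def pvEscBGo (acc : List Char) : List Char → List Char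
  | [] => acc.reverse
  | ch :: rest =>
      if ch ∈ "&%$#_{}~^".toList then pvEscBGo (ch :: '\\' :: acc) rest
      else pvEscBGo (ch :: acc) rest

def pvEscB (s : String) : String := String.ofList (pvEscBGo [] s.toList)

def fallback_latex_alt (base_resume : String) (job : List (String × String)) (reason : String) : String :=
  let d := PySem.Dict.mk job
  let title := pvEscB (PySem.Dict.getD d "Position Title" "Position")
  let company := pvEscB (PySem.Dict.getD d "Company" "Company")
  PySem.Str.join ""
    [ "\\documentclass[11pt]{article}\n\\usepackage[margin=0.75in]{geometry}\n\\usepackage{parskip}\n\\begin{document}\n\n% Tailoring failed: ",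
      reason, "\n% Job: ", title, " @ ", company,
      "\n\n\\begin{center}{\\Large \\textbf{", title, " --- ", company,
      "}}\\end{center}\n\n",
      pvEscB (PySem.Str.slice base_resume none (some 3000)),
      "\n\n\\end{document}\n" ]

-- ===== PRECONDITION & SPEC =====
def Spec_fallback_latex (base_resume : String) (job : List (String × String)) (reason : String) (out : String) : Prop := out = fallback_latex_alt base_resume job reason
instance (base_resume : String) (job : List (String × String)) (reason : String) (out : String) : Decidable (Spec_fallback_latex base_resume job reason out) := by unfold Spec_fallback_latex; infer_instance

-- ===== CLAIM (what is proved, stated in full; the proofs are below) =====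
def Claim_equal_fallback_latex : Prop := ∀ (base_resume : String) (job : List (String × String)) (reason : String), Dom_fallback_latex base_resume job reason → Spec_fallback_latex base_resume job reason (fallback_latex base_resume job reason)

-- ===== LEMMAS AND PROOFS =====

theorem intercalate_nil_sep (ls : List (List Char)) : List.intercalate [] ls = ls.flatten := by
  induction ls with
  | nil => rfl
  | cons a t ih =>
    cases t with
    | nil => simp [List.intercalate]
    | cons b t' =>
      simp only [List.intercalate] at *
      simp [List.intersperse, List.flatten] at *
      simpa using ih

-- s.replace(c, new) for a single character c is the per-character substitution map
theorem replace_go_singleton (c : Char) (new : List Char) :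
    ∀ (s acc : List Char),
      PySem.Chars.replace.go [c] new s.length s acc
        = acc.reverse ++ s.flatMap (fun x => if x = c then new else [x]) := by
  intro s
  induction s with
  | nil => intro acc; simp [PySem.Chars.replace.go]
  | cons x t ih =>
      intro acc
      simp only [List.length_cons, PySem.Chars.replace.go]
      by_cases hx : x = c
      · subst hx
        simp [List.isPrefixOf, ih, List.flatMap_cons]
      · have hpre : List.isPrefixOf [c] (x :: t) = false := by
          simp [List.isPrefixOf]; intro h; exact absurd h.symm hx
        simp [hpre, ih, List.flatMap_cons, hx]

theorem replace_singleton (c : Char) (new s : List Char) :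
    PySem.Chars.replace s [c] new = s.flatMap (fun x => if x = c then new else [x]) := by
  have : ([c] : List Char).isEmpty = false := rfl
  simpa [PySem.Chars.replace, this] using replace_go_singleton c new s []

-- chaining single-char replaces over distinct non-backslash characters = one substitution pass
theorem chain_eq (cs : List Char) (hb : '\\' ∉ cs) (hn : cs.Nodup) :
    ∀ s : List Char,
      cs.foldl (fun s c => PySem.Chars.replace s [c] ['\\', c]) s
        = s.flatMap (fun x => if x ∈ cs then ['\\', x] else [x]) := by
  induction cs with
  | nil => intro s; simp
  | cons c cs ih =>
      intro s
      have hb' : '\\' ∉ cs := fun h => hb (List.mem_cons_of_mem _ h)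
      have hbc : ('\\' : Char) ≠ c := fun h => hb (h ▸ List.mem_cons_self ..)
      have hcn : c ∉ cs := (List.nodup_cons.mp hn).1
      have hn' : cs.Nodup := (List.nodup_cons.mp hn).2
      rw [List.foldl_cons, ih hb' hn', replace_singleton, List.flatMap_assoc]
      apply List.flatMap_congr
      intro x _
      by_cases hx : x = c
      · subst hx
        simp [List.flatMap_cons, hb', hcn]
      · by_cases hm : x ∈ cs <;> simp [List.flatMap_cons, hx, hm]

-- A's escaper characterised as the single substitution pass
theorem escA_eq (s : String) :
    (pvEscA s).toList
      = s.toList.flatMap (fun x => if x ∈ "&%$#_{}~^".toList then ['\\', x] else [x]) := by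
  have bridge : ∀ (cs : List Char) (t : String),
      (cs.foldl (fun s c => PySem.Str.replace s (String.ofList [c]) (String.ofList ['\\', c])) t).toList
        = cs.foldl (fun s c => PySem.Chars.replace s [c] ['\\', c]) t.toList := by
    intro cs
    induction cs with
    | nil => intro t; rfl
    | cons c cs ih =>
        intro t
        simp only [List.foldl_cons, ih, PySem.Str.toList_replace, String.toList_ofList]
  rw [pvEscA, bridge]
  exact chain_eq _ (by decide) (by decide) s.toList

-- B's accumulator loop characterised as the same substitution pass
theorem escBGo_eq :
    ∀ (l acc : List Char),
      pvEscBGo acc l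
        = acc.reverse ++ l.flatMap (fun x => if x ∈ "&%$#_{}~^".toList then ['\\', x] else [x]) := by
  intro l
  induction l with
  | nil => intro acc; simp [pvEscBGo]
  | cons ch rest ih =>
      intro acc
      simp only [pvEscBGo, ih, List.flatMap_cons]
      split <;> simp

theorem esc_eq (s : String) : pvEscA s = pvEscB s := by
  apply String.toList_inj.mp
  rw [escA_eq, pvEscB, String.toList_ofList, escBGo_eq]
  simp

-- ===== VERDICT (by name: the statement is the Claim_ definition above) =====
theorem fallback_latex_spec : Claim_equal_fallback_latex := by
  intro base_resume job reason _
  unfold Spec_fallback_latex fallback_latex fallback_latex_alt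
  apply String.toList_inj.mp
  simp only [esc_eq]
  have hjoin : ∀ ls : List (List Char), PySem.Chars.join [] ls = ls.flatten :=
    fun ls => intercalate_nil_sep ls
  simp only [PySem.Str.toList_join, List.map_cons, List.map_nil, String.toList_empty, hjoin,
    List.flatten_cons, List.flatten_nil, String.toList_append, List.append_assoc, List.append_nil]
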